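-- pv_equiv track=rewrite | github.com/YorkUCVIL/Wavelet-Flow | src/models/shared/Normalizing_flow.py | compute_latent_shapes
-- ===== SOURCE A (Python) =====
-- def compute_latent_shapes(data_shape, n_squeezes):
-- 	'''
-- 	computes shapes of latents given data shape
-- 	assumes we split the latent in half every squeeze except last
-- 	'''
-- 	h = data_shape[1]
-- 	w = data_shape[2]
-- 	c = data_shape[3]
-- 	n_resolutions = n_squeezes
-- 	latent_shapes = [] # ordered closest to data to furthest
--
-- 	cur_h = h
-- 	cur_w = w
-- 	cur_c = c
--
-- 	for res_level in range(n_resolutions):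
-- 		cur_h //= 2
-- 		cur_w //= 2
-- 		cur_c *= 2
-- 		latent_shapes.append([cur_h,cur_w,cur_c])
--
-- 	# correct last shape becuase no split
-- 	if n_resolutions == 0:
-- 		latent_shapes.append([cur_h,cur_w,cur_c])
-- 	else:
-- 		latent_shapes[-1][-1] = latent_shapes[-1][-1]*2
--
-- 	return latent_shapes
-- ===== SOURCE B (Python) =====
-- def compute_latent_shapes(data_shape, n_squeezes):
--     h, w, c = data_shape[1], data_shape[2], data_shape[3]
--     if n_squeezes == 0:
--         return [[h, w, c]]
--     return [[h >> (i + 1), w >> (i + 1),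
--              c << (i + 2 if i == n_squeezes - 1 else i + 1)]
--             for i in range(n_squeezes)]
-- ===== Notes on version B (the rewrite author's own statement) =====
-- stated objective: simpler
-- what changed: Replaced the stateful cur_h/cur_w/cur_c accumulation loop plus post-hoc last-element mutation by a single comprehension computing each level's shape in closed form from its index (with the last level's channel exponent bumped by one), so no mutable state or list patching remains.
import Mathlib
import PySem

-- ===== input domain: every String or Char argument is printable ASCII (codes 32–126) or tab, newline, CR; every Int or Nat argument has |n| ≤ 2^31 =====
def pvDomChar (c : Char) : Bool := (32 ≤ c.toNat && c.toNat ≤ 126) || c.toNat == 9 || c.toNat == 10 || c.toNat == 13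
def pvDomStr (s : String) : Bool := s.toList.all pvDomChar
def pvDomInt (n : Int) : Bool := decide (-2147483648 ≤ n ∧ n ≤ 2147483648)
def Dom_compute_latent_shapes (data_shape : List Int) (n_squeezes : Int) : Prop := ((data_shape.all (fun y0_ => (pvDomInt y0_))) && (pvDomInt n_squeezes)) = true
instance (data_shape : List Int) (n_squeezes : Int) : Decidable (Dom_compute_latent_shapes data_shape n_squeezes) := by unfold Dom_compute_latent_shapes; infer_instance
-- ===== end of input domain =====

-- B replaces A's stateful cur_h/cur_w/cur_c loop and final in-place patch by a closed-form
-- per-index comprehension (objective: simpler).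

-- ===== PORT A =====
-- A's `latent_shapes[-1][-1] = latent_shapes[-1][-1]*2`: double the last entry of the last
-- inner list (no-op on empty only outside Pre_, where Python raises IndexError).
def pvDoubleLast (xs : List Int) : List Int :=
  match xs.getLast? with
  | none => xs
  | some v => xs.dropLast ++ [v * 2]

-- loop body of A: one squeeze step on state (cur_h, cur_w, cur_c, latent_shapes)
def pvStepA (s : Int × Int × Int × List (List Int)) (_res_level : Int) :
    Int × Int × Int × List (List Int) :=
  let ch := PySem.Int.floordiv s.1 2
  let cw := PySem.Int.floordiv s.2.1 2
  let cc := s.2.2.1 * 2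
  (ch, cw, cc, s.2.2.2 ++ [[ch, cw, cc]])

def compute_latent_shapes (data_shape : List Int) (n_squeezes : Int) : List (List Int) :=
  match PySem.List.pyGet? data_shape 1, PySem.List.pyGet? data_shape 2,
        PySem.List.pyGet? data_shape 3 with
  | some h, some w, some c =>
    -- for res_level in range(n_resolutions): accumulate (cur_h, cur_w, cur_c, latent_shapes)
    let st := (PySem.List.pyRange 0 n_squeezes 1).foldl pvStepA (h, w, c, [])
    if n_squeezes = 0 then st.2.2.2 ++ [[st.1, st.2.1, st.2.2.1]]
    else
      match st.2.2.2.getLast? with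
      | none => []   -- Python raises IndexError here (n_squeezes < 0); outside Pre_
      | some last => st.2.2.2.dropLast ++ [pvDoubleLast last]
  | _, _, _ => []    -- Python raises IndexError (len(data_shape) < 4); outside Pre_

-- ===== PORT B =====
def compute_latent_shapes_alt (data_shape : List Int) (n_squeezes : Int) : List (List Int) :=
  match PySem.List.pyGet? data_shape 1 with
  | none => []       -- Python raises IndexError (len(data_shape) < 2); outside Pre_
  | some h =>
    match PySem.List.pyGet? data_shape 2 with
    | none => []     -- Python raises IndexError; outside Pre_
    | some w =>
      match PySem.List.pyGet? data_shape 3 with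
      | none => []   -- Python raises IndexError; outside Pre_
      | some c =>
        if n_squeezes = 0 then [[h, w, c]]
        else
          (PySem.List.pyRange 0 n_squeezes 1).map (fun i =>
            -- i ranges over 0..n_squeezes-1, so the shift counts i+1 / i+2 are ≥ 1 and
            -- .toNat is exact; Python's x >> k / x << k on ints are core Lean's >>> / <<<
            [h >>> (i + 1).toNat, w >>> (i + 1).toNat,
             c <<< (if i = n_squeezes - 1 then (i + 2).toNat else (i + 1).toNat)])

-- ===== PRECONDITION & SPEC =====
-- Pre_ excludes exactly the inputs where Python A raises IndexError: fewer than four dims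
-- (data_shape[3] out of range) or negative n_squeezes (latent_shapes[-1] on an empty list).
def Pre_compute_latent_shapes (data_shape : List Int) (n_squeezes : Int) : Prop :=
  4 ≤ data_shape.length ∧ 0 ≤ n_squeezes
instance (data_shape : List Int) (n_squeezes : Int) : Decidable (Pre_compute_latent_shapes data_shape n_squeezes) := by unfold Pre_compute_latent_shapes; infer_instance

def pvWitness_compute_latent_shapes : List Int × Int := ([1, 16, 32, 3], 2)

def Spec_compute_latent_shapes (data_shape : List Int) (n_squeezes : Int) (out : List (List Int)) : Prop := out = compute_latent_shapes_alt data_shape n_squeezes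
instance (data_shape : List Int) (n_squeezes : Int) (out : List (List Int)) : Decidable (Spec_compute_latent_shapes data_shape n_squeezes out) := by unfold Spec_compute_latent_shapes; infer_instance

-- ===== CLAIM (what is proved, stated in full; the proofs are below) =====
def Claim_equal_compute_latent_shapes : Prop := ∀ (data_shape : List Int) (n_squeezes : Int), Dom_compute_latent_shapes data_shape n_squeezes → Pre_compute_latent_shapes data_shape n_squeezes → Spec_compute_latent_shapes data_shape n_squeezes (compute_latent_shapes data_shape n_squeezes)
-- ===== LEMMAS AND PROOFS =====

-- Python x >> k for k ≥ 0: shifting an Int right by an Int-cast Nat floors like //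
lemma pvShiftRI (a : Int) (k : Nat) : a >>> ((k : Int) + 1) = a / 2 ^ (k + 1) := by
  have hc : ((k : Int) + 1) = ((k + 1 : Nat) : Int) := by push_cast; ring
  rw [hc, Int.shiftRight_natCast_right, Int.shiftRight_eq_div_pow]
  norm_cast

-- closed-form shape for level k (0-based), before the final channel correction
def pvShape (h w c : Int) (k : Nat) : List Int :=
  [PySem.Int.floordiv h (2 ^ (k + 1)), PySem.Int.floordiv w (2 ^ (k + 1)), c * 2 ^ (k + 1)]

lemma pvFloordiv_two (a : Int) (k : Nat) :
    PySem.Int.floordiv (PySem.Int.floordiv a (2 ^ k)) 2 = PySem.Int.floordiv a (2 ^ (k + 1)) := by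
  rw [PySem.Int.floordiv_eq_ediv_of_pos (a := a) (by positivity),
      PySem.Int.floordiv_eq_ediv_of_pos (by norm_num),
      PySem.Int.floordiv_eq_ediv_of_pos (by positivity),
      Int.ediv_ediv_of_nonneg (by positivity), pow_succ]

lemma pvLoop_inv (h w c : Int) (k : Nat) :
    (PySem.List.pyRange 0 (k : Int) 1).foldl pvStepA (h, w, c, [])
    = (PySem.Int.floordiv h (2 ^ k), PySem.Int.floordiv w (2 ^ k), c * 2 ^ k,
       (List.range k).map (pvShape h w c)) := by
  induction k with
  | zero =>
      simp [PySem.List.pyRange_one_eq_nil (a := 0) (b := 0) le_rfl,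
            PySem.Int.floordiv_eq_ediv_of_pos]
  | succ k ih =>
      rw [show ((k + 1 : Nat) : Int) = (k : Int) + 1 by push_cast; ring,
          PySem.List.pyRange_one_succ_right (by positivity), List.foldl_append, ih]
      simp only [List.foldl_cons, List.foldl_nil, List.range_succ, List.map_append, List.map_cons,
        List.map_nil, pvStepA, Prod.mk.injEq]
      refine ⟨pvFloordiv_two h k, pvFloordiv_two w k, by ring, ?_⟩
      simp only [pvShape, pvFloordiv_two, pow_succ]
      ring_nf

lemma pvRange_map_split (n : Nat) (hn : 0 < n) (f : Nat → List Int) :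
    (List.range n).map f = (List.range (n - 1)).map f ++ [f (n - 1)] := by
  conv_lhs => rw [show n = (n - 1) + 1 by omega, List.range_succ]
  simp

theorem compute_latent_shapes_spec : Claim_equal_compute_latent_shapes := by
  intro data_shape n_squeezes _hdom hpre
  obtain ⟨hlen, hn⟩ := hpre
  obtain ⟨a, h, w, c, rest, rfl⟩ :
      ∃ a h w c rest, data_shape = a :: h :: w :: c :: rest := by
    match data_shape, hlen with
    | a :: h :: w :: c :: rest, _ => exact ⟨a, h, w, c, rest, rfl⟩
  unfold Spec_compute_latent_shapes compute_latent_shapes compute_latent_shapes_alt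
  have h1 : PySem.List.pyGet? (a :: h :: w :: c :: rest) 1 = some h := by
    simp only [PySem.List.pyGet?, PySem.List.pyIdx?]
    repeat' split
    all_goals simp_all
    all_goals omega
  have h2 : PySem.List.pyGet? (a :: h :: w :: c :: rest) 2 = some w := by
    simp only [PySem.List.pyGet?, PySem.List.pyIdx?]
    repeat' split
    all_goals simp_all
    all_goals omega
  have h3 : PySem.List.pyGet? (a :: h :: w :: c :: rest) 3 = some c := by
    simp only [PySem.List.pyGet?, PySem.List.pyIdx?]
    repeat' split
    all_goals simp_all
    all_goals omega
  rw [h1, h2, h3]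
  simp only
  by_cases h0 : n_squeezes = 0
  · subst h0
    simp [PySem.List.pyRange_one_eq_nil (a := 0) (b := 0) le_rfl]
  · -- n_squeezes > 0
    have hpos : 0 < n_squeezes := lt_of_le_of_ne hn (Ne.symm h0)
    obtain ⟨n, rfl⟩ : ∃ n : Nat, n_squeezes = (n : Int) :=
      ⟨n_squeezes.toNat, (Int.toNat_of_nonneg hn).symm⟩
    have hnpos : 0 < n := by exact_mod_cast hpos
    rw [pvLoop_inv h w c n]
    simp only [if_neg h0]
    -- A side: split off the last level and apply the channel correction
    rw [pvRange_map_split n hnpos (pvShape h w c)]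
    have hlast : (((List.range (n - 1)).map (pvShape h w c) ++ [pvShape h w c (n - 1)]).getLast?)
        = some (pvShape h w c (n - 1)) := by simp
    rw [hlast]
    simp only [List.dropLast_concat]
    -- B side: pyRange as a Nat range, then split the conditional
    rw [PySem.List.pyRange_one 0 n]
    simp only [sub_zero, Int.toNat_natCast, List.map_map]
    rw [pvRange_map_split n hnpos]
    congr 1
    · -- levels 0..n-2: the condition i = n-1 is false
      apply List.map_congr_left
      intro k hk
      have hk' : k < n - 1 := List.mem_range.mp hk
      simp only [Function.comp, zero_add]
      rw [if_neg (show ¬ ((k : Int) = (n : Int) - 1) by omega)]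
      have hk1 : ((k : Int) + 1).toNat = k + 1 := by omega
      simp [hk1, pvShape, Int.shiftLeft_eq]
      simp [pvShiftRI]
    · -- last level: condition holds, exponent bumped by one
      simp only [Function.comp, zero_add]
      rw [if_pos (show (((n - 1 : Nat)) : Int) = (n : Int) - 1 by omega)]
      have h2n : ((((n - 1 : Nat)) : Int) + 2).toNat = (n - 1) + 2 := by omega
      have h1n : ((((n - 1 : Nat)) : Int) + 1).toNat = (n - 1) + 1 := by omega
      simp [h2n, h1n, pvDoubleLast, pvShape, Int.shiftLeft_eq, pow_succ, mul_assoc]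
      simp [pvShiftRI, pow_succ]

-- ===== VERDICT (by name: the statement is the Claim_ definition above) =====
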